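-- pv_equiv track=rewrite | github.com/Siddh-2006/Academic_work | Python_lab/python lab_3/rsplit.py | R_split
-- ===== SOURCE A (Python) =====
-- def R_split(string, delimiter=" ", maxsplit=-1):
--     result = []
--     current = []
--     count = 0
--
--     for char in reversed(string):
--         if char == delimiter and (maxsplit == -1 or count < maxsplit):
--             result.append("".join(reversed(current)))
--             current = []
--             count += 1
--         else:
--             current.append(char)
--
--     result.append("".join(reversed(current)))
--
--     return list(reversed(result))
-- ===== SOURCE B (Python) =====
-- def R_split(string, delimiter=" ", maxsplit=-1):
--     positions = [i for i, c in enumerate(string) if c == delimiter]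
--     if maxsplit == -1:
--         chosen = positions
--     elif maxsplit >= 0:
--         chosen = positions[max(0, len(positions) - maxsplit):]
--     else:
--         chosen = []
--     parts = []
--     prev = -1
--     for i in chosen:
--         parts.append(string[prev + 1:i])
--         prev = i
--     parts.append(string[prev + 1:])
--     return parts
-- ===== Notes on version B (the rewrite author's own statement) =====
-- stated objective: alternative
-- what changed: Replaces A's per-character reversed-scan state machine (accumulating characters and reversing twice) by one pass that collects delimiter positions, selects the last maxsplit of them, and slices the string between consecutive boundaries.
import Mathlib
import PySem

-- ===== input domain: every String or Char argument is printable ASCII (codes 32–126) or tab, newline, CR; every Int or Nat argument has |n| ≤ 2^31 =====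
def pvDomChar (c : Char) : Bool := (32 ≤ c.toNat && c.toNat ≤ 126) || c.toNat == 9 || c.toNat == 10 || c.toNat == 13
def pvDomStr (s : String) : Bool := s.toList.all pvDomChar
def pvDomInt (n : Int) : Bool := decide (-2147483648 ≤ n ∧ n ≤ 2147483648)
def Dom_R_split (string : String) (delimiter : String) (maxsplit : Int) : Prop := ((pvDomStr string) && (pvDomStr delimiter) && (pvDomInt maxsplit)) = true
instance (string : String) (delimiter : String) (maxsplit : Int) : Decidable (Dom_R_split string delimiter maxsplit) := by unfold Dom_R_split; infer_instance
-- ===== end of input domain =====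

-- B replaces A's per-character reversed-scan state machine by one scan collecting delimiter
-- positions, choosing the last maxsplit of them, and slicing between consecutive boundaries
-- (objective: alternative, same exact behaviour).

-- ===== PORT A =====
-- A's loop body (state: result, current, count), taken step for step from the Python.
def pvStepA (delimiter : String) (maxsplit : Int)
    (st : List String × List Char × Int) (c : Char) : List String × List Char × Int :=
  if (String.ofList [c] == delimiter) && ((maxsplit == -1) || decide (st.2.2 < maxsplit)) then
    (st.1 ++ [String.ofList st.2.1.reverse], [], st.2.2 + 1)
  else
    (st.1, st.2.1 ++ [c], st.2.2)

def R_split (string : String) (delimiter : String) (maxsplit : Int) : List String :=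
  let fin := string.toList.reverse.foldl (pvStepA delimiter maxsplit) ([], [], 0)
  (fin.1 ++ [String.ofList fin.2.1.reverse]).reverse

-- ===== PORT B =====
-- B's loop body (state: parts, prev), taken step for step from Source B.
def pvStepB (string : String) (st : List String × Int) (i : Int) : List String × Int :=
  (st.1 ++ [PySem.Str.slice string (some (st.2 + 1)) (some i)], i)

def R_split_alt (string : String) (delimiter : String) (maxsplit : Int) : List String :=
  let positions : List Int :=
    (PySem.List.enumerate string.toList 0).filterMap
      (fun p => if String.ofList [p.2] == delimiter then some p.1 else none)
  let chosen : List Int :=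
    if maxsplit == -1 then positions
    else if 0 ≤ maxsplit then
      PySem.List.slice positions (some (max 0 ((positions.length : Int) - maxsplit))) none
    else []
  let fin := chosen.foldl (pvStepB string) ([], -1)
  fin.1 ++ [PySem.Str.slice string (some (fin.2 + 1)) none]

-- ===== PRECONDITION & SPEC =====
def Spec_R_split (string : String) (delimiter : String) (maxsplit : Int) (out : List String) : Prop := out = R_split_alt string delimiter maxsplit
instance (string : String) (delimiter : String) (maxsplit : Int) (out : List String) : Decidable (Spec_R_split string delimiter maxsplit out) := by unfold Spec_R_split; infer_instance

-- ===== CLAIM (what is proved, stated in full; the proofs are below) =====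
def Claim_equal_R_split : Prop := ∀ (string : String) (delimiter : String) (maxsplit : Int), Dom_R_split string delimiter maxsplit → Spec_R_split string delimiter maxsplit (R_split string delimiter maxsplit)

-- ===== LEMMAS AND PROOFS =====

-- The character-match predicate both programs use.
def pvP (delimiter : String) (c : Char) : Bool := String.ofList [c] == delimiter

-- Remaining split budget after `cnt` splits: `none` = unlimited (maxsplit == -1).
def pvBudget (m cnt : Int) : Option Nat := if m = -1 then none else some (m - cnt).toNat

-- Reference: segments of the string, listed right-to-left, each in left-to-right
-- character order, splitting at the first `b` matches of the reversed list `r`.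
def pvRefRev (P : Char → Bool) : Option Nat → List Char → List (List Char)
  | _, [] => [[]]
  | b, c :: r =>
    if P c && b != some 0 then [] :: pvRefRev P (b.map Nat.pred) r
    else
      match pvRefRev P b r with
      | [] => [[]]
      | h :: t => (h ++ [c]) :: t

lemma pvRefRev_cons_pos (P : Char → Bool) (b : Option Nat) (c : Char) (r : List Char)
    (h : (P c && b != some 0) = true) :
    pvRefRev P b (c :: r) = [] :: pvRefRev P (b.map Nat.pred) r := by
  conv_lhs => unfold pvRefRev
  simp [h]

lemma pvRefRev_cons_neg (P : Char → Bool) (b : Option Nat) (c : Char) (r : List Char)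
    (h : (P c && b != some 0) = false) :
    pvRefRev P b (c :: r)
      = match pvRefRev P b r with
        | [] => [[]]
        | h :: t => (h ++ [c]) :: t := by
  conv_lhs => unfold pvRefRev
  simp [h]

def pvCombine (x : List Char) : List (List Char) → List (List Char)
  | [] => [x]
  | h :: t => (h ++ x) :: t

lemma pvRefRev_ne_nil (P : Char → Bool) (b : Option Nat) (r : List Char) :
    pvRefRev P b r ≠ [] := by
  cases r with
  | nil => simp [pvRefRev]
  | cons c r =>
    unfold pvRefRev
    split
    · simp
    · cases h : pvRefRev P b r <;> simp

lemma pvBudget_cond (m cnt : Int) :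
    ((m == -1) || decide (cnt < m)) = (pvBudget m cnt != some 0) := by
  unfold pvBudget
  by_cases hm : m = -1
  · simp [hm]
  · by_cases hc : cnt < m
    · have : (m - cnt).toNat ≠ 0 := by omega
      simp [hm, hc, this]
    · have : (m - cnt).toNat = 0 := by omega
      simp [hm, hc, this]

lemma pvBudget_pred (m cnt : Int) (h : (pvBudget m cnt != some 0) = true) :
    (pvBudget m cnt).map Nat.pred = pvBudget m (cnt + 1) := by
  unfold pvBudget at *
  by_cases hm : m = -1
  · simp [hm]
  · simp [hm] at *
    omega

-- A's fold, characterised by the reference.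
lemma pvFoldA (delimiter : String) (m : Int) :
    ∀ (r : List Char) (res : List String) (cur : List Char) (cnt : Int),
      (let fin := r.foldl (pvStepA delimiter m) (res, cur, cnt)
       fin.1 ++ [String.ofList fin.2.1.reverse])
      = res ++ (pvCombine cur.reverse (pvRefRev (pvP delimiter) (pvBudget m cnt) r)).map String.ofList := by
  intro r
  induction r with
  | nil =>
    intro res cur cnt
    simp [pvRefRev, pvCombine]
  | cons c r ih =>
    intro res cur cnt
    simp only [List.foldl_cons]
    by_cases hcond : ((String.ofList [c] == delimiter) && ((m == -1) || decide (cnt < m))) = true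
    · have hb : (pvBudget m cnt != some 0) = true := by
        rw [← pvBudget_cond]
        exact (Bool.and_eq_true_iff.mp hcond).2
      rw [show pvStepA delimiter m (res, cur, cnt) c
            = (res ++ [String.ofList cur.reverse], [], cnt + 1) by
        simp [pvStepA, hcond]]
      rw [ih]
      have hP : pvP delimiter c = true := (Bool.and_eq_true_iff.mp hcond).1
      rw [pvRefRev_cons_pos _ _ _ _ (by simp [hP, hb])]
      rw [pvBudget_pred m cnt hb]
      rcases hne : pvRefRev (pvP delimiter) (pvBudget m (cnt + 1)) r with _ | ⟨h, t⟩
      · exact absurd hne (pvRefRev_ne_nil _ _ _)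
      · simp [pvCombine]
    · rw [show pvStepA delimiter m (res, cur, cnt) c = (res, cur ++ [c], cnt) by
        simp only [pvStepA]
        rw [if_neg]
        simp [hcond]]
      rw [ih]
      have hsplit : (pvP delimiter c && (pvBudget m cnt != some 0)) = false := by
        rw [← pvBudget_cond]
        unfold pvP
        simpa using hcond
      rw [pvRefRev_cons_neg _ _ _ _ hsplit]
      rcases hne : pvRefRev (pvP delimiter) (pvBudget m cnt) r with _ | ⟨h, t⟩
      · exact absurd hne (pvRefRev_ne_nil _ _ _)
      · simp [pvCombine]

theorem pvA_char (string delimiter : String) (m : Int) :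
    R_split string delimiter m
      = ((pvRefRev (pvP delimiter) (pvBudget m 0) string.toList.reverse).map String.ofList).reverse := by
  have h := pvFoldA delimiter m string.toList.reverse [] [] 0
  simp only [List.nil_append, List.reverse_nil] at h
  unfold R_split
  show ((List.foldl (pvStepA delimiter m) ([], [], 0) string.toList.reverse).1 ++
      [String.ofList (List.foldl (pvStepA delimiter m) ([], [], 0) string.toList.reverse).2.1.reverse]).reverse = _
  rw [h]
  rcases hne : pvRefRev (pvP delimiter) (pvBudget m 0) string.toList.reverse with _ | ⟨hd, t⟩
  · exact absurd hne (pvRefRev_ne_nil _ _ _)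
  · simp [pvCombine]

-- ---- B side ----

-- Delimiter positions, with enumeration starting at `st`.
def pvPos (P : Char → Bool) (st : Int) (s : List Char) : List Int :=
  (PySem.List.enumerate s st).filterMap (fun p => if P p.2 then some p.1 else none)

-- The chosen boundaries: all positions (unlimited) or the last `k` of them.
def pvChosen (b : Option Nat) (ps : List Int) : List Int :=
  match b with
  | none => ps
  | some k => ps.drop (ps.length - k)

-- B's slicing loop as a recursion over the chosen boundaries.
def pvCore (s : List Char) : Int → List Int → List (List Char)
  | prev, [] => [s.drop (prev + 1).toNat]
  | prev, i :: rest =>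
      (s.drop (prev + 1).toNat).take (i.toNat - (prev + 1).toNat) :: pvCore s i rest

lemma pvPos_mem (P : Char → Bool) (st : Int) (s : List Char) (j : Int) :
    j ∈ pvPos P st s ↔ ∃ (k : Nat) (h : k < s.length), j = st + k ∧ P s[k] = true := by
  unfold pvPos
  rw [List.mem_filterMap]
  constructor
  · rintro ⟨p, hp, hf⟩
    rw [PySem.List.mem_enumerate_iff] at hp
    obtain ⟨k, hk, rfl⟩ := hp
    by_cases h : P s[k] = true
    · exact ⟨k, hk, by simpa [h] using hf.symm, h⟩
    · simp [h] at hf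
  · rintro ⟨k, hk, rfl, hPk⟩
    refine ⟨(st + k, s[k]), ?_, by simp [hPk]⟩
    rw [PySem.List.mem_enumerate_iff]
    exact ⟨k, hk, rfl⟩

lemma pvPos_pairwise (P : Char → Bool) (st : Int) (s : List Char) :
    (pvPos P st s).Pairwise (· < ·) := by
  induction s generalizing st with
  | nil => simp [pvPos, PySem.List.enumerate]
  | cons c s ih =>
    unfold pvPos
    rw [PySem.List.enumerate_cons, List.filterMap_cons]
    have htail : (pvPos P (st + 1) s).Pairwise (· < ·) := ih (st + 1)
    by_cases hPc : P c = true
    · simp only [hPc, if_pos]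
      refine List.Pairwise.cons ?_ htail
      intro j hj
      have hj' : j ∈ pvPos P (st + 1) s := hj
      rw [pvPos_mem] at hj'
      obtain ⟨k, hk, rfl, _⟩ := hj'
      omega
    · simp only [hPc]
      simpa using htail

lemma pvPos_append (P : Char → Bool) (st : Int) (u v : List Char) :
    pvPos P st (u ++ v) = pvPos P st u ++ pvPos P (st + u.length) v := by
  unfold pvPos
  rw [PySem.List.enumerate_append, List.filterMap_append]

lemma pvPos_free (P : Char → Bool) (st : Int) (s : List Char)
    (h : ∀ c ∈ s, P c = false) : pvPos P st s = [] := by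
  unfold pvPos
  rw [List.filterMap_eq_nil_iff]
  intro p hp
  rw [PySem.List.mem_enumerate_iff] at hp
  obtain ⟨k, hk, rfl⟩ := hp
  simp [h s[k] (s.getElem_mem hk)]

lemma pvRefRev_free (P : Char → Bool) (b : Option Nat) (u r : List Char)
    (hu : ∀ c ∈ u, P c = false) :
    pvRefRev P b (u ++ r) = pvCombine u.reverse (pvRefRev P b r) := by
  induction u with
  | nil =>
    rcases hne : pvRefRev P b r with _ | ⟨h, t⟩
    · exact absurd hne (pvRefRev_ne_nil _ _ _)
    · simp [pvCombine, hne]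
  | cons c u ih =>
    have hc : P c = false := hu c (by simp)
    rw [List.cons_append, pvRefRev_cons_neg _ _ _ _ (by simp [hc])]
    rw [ih (fun x hx => hu x (by simp [hx]))]
    rcases hne : pvRefRev P b r with _ | ⟨h, t⟩
    · exact absurd hne (pvRefRev_ne_nil _ _ _)
    · simp [pvCombine]

lemma pvRefRev_nosplit (P : Char → Bool) (b : Option Nat) (r : List Char)
    (h : (∀ c ∈ r, P c = false) ∨ b = some 0) : pvRefRev P b r = [r.reverse] := by
  rcases h with h | rfl
  · have := pvRefRev_free P b r [] h
    simpa [pvRefRev, pvCombine] using this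
  · induction r with
    | nil => simp [pvRefRev]
    | cons c r ih =>
      rw [pvRefRev_cons_neg _ _ _ _ (by simp), ih]
      simp

lemma pvCore_snoc (s : List Char) (i : Int) (hi : 0 ≤ i) :
    ∀ (q : List Int) (prev : Int), -1 ≤ prev → (∀ j ∈ q, 0 ≤ j ∧ j < i) →
      pvCore s prev (q ++ [i])
        = pvCore (s.take i.toNat) prev q ++ [s.drop (i.toNat + 1)] := by
  intro q
  induction q with
  | nil =>
    intro prev hprev _
    have h1 : (i + 1).toNat = i.toNat + 1 := by omega
    simp only [List.nil_append, pvCore, h1]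
    rw [List.drop_take]
    simp
  | cons j q ih =>
    intro prev hprev hq
    obtain ⟨hj0, hji⟩ := hq j (by simp)
    simp only [List.cons_append, pvCore]
    rw [ih j (by omega) (fun x hx => hq x (by simp [hx]))]
    rw [List.drop_take, List.take_take]
    have : min (j.toNat - (prev + 1).toNat) (i.toNat - (prev + 1).toNat)
        = j.toNat - (prev + 1).toNat := by omega
    rw [this]

lemma pvPos_cons (P : Char → Bool) (st : Int) (c : Char) (w : List Char) :
    pvPos P st (c :: w) = (if P c then [st] else []) ++ pvPos P (st + 1) w := by
  unfold pvPos
  rw [PySem.List.enumerate_cons, List.filterMap_cons]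
  by_cases hc : P c = true <;> simp [hc]

lemma pvChosen_nil (b : Option Nat) : pvChosen b [] = [] := by
  cases b <;> simp [pvChosen]

lemma pvChosen_subset (b : Option Nat) (ps : List Int) (j : Int) (h : j ∈ pvChosen b ps) :
    j ∈ ps := by
  cases b with
  | none => exact h
  | some k => exact List.mem_of_mem_drop h

lemma pvChosen_concat (b : Option Nat) (hb : b ≠ some 0) (ps : List Int) (i : Int) :
    pvChosen b (ps ++ [i]) = pvChosen (b.map Nat.pred) ps ++ [i] := by
  cases b with
  | none => rfl
  | some k =>
    have hk : 1 ≤ k := Nat.pos_of_ne_zero (by simpa using hb)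
    show (ps ++ [i]).drop ((ps ++ [i]).length - k) = ps.drop (ps.length - k.pred) ++ [i]
    have h2 : (ps ++ [i]).length - k = ps.length - k.pred := by simp; omega
    rw [h2, List.drop_append_of_le_length (Nat.sub_le _ _)]

-- The crux: B's slicing over the chosen last-k boundaries equals the reference.
theorem pvCrux (P : Char → Bool) : ∀ (n : Nat) (s : List Char) (b : Option Nat),
    s.length = n →
    pvCore s (-1) (pvChosen b (pvPos P 0 s)) = (pvRefRev P b s.reverse).reverse := by
  intro n
  induction n using Nat.strong_induction_on with
  | _ n ih =>
    intro s b hn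
    by_cases hz : pvPos P 0 s = [] ∨ b = some 0
    · -- no boundary is chosen: one segment, the whole string
      have hfree : pvPos P 0 s = [] → ∀ c ∈ s, P c = false := by
        intro hps c hc
        rw [List.mem_iff_getElem] at hc
        obtain ⟨k, hk, rfl⟩ := hc
        by_contra hP
        have : (k : Int) ∈ pvPos P 0 s := by
          rw [pvPos_mem]
          exact ⟨k, hk, by omega, by simpa using hP⟩
        simp [hps] at this
      have hch : pvChosen b (pvPos P 0 s) = [] := by
        rcases hz with hps | rfl
        · rw [hps]; exact pvChosen_nil b
        · simp [pvChosen]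
      rw [hch]
      have hrr : pvRefRev P b s.reverse = [s.reverse.reverse] := by
        apply pvRefRev_nosplit
        rcases hz with hps | rfl
        · exact Or.inl (fun c hc => hfree hps c (List.mem_reverse.mp hc))
        · exact Or.inr rfl
      rw [hrr]
      simp [pvCore]
    · push Not at hz
      obtain ⟨hps, hb⟩ := hz
      rcases List.eq_nil_or_concat (pvPos P 0 s) with h | ⟨X, i, hXi⟩
      · exact absurd h hps
      rw [List.concat_eq_append] at hXi
      -- i is a genuine position: i = k with P s[k]
      have hiMem : i ∈ pvPos P 0 s := by rw [hXi]; simp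
      rw [pvPos_mem] at hiMem
      obtain ⟨k, hk, hik, hPk⟩ := hiMem
      have hik' : i = (k : Int) := by omega
      -- everything right of k is delimiter-free
      have hmax : ∀ x ∈ X, x < i := by
        have hpw := pvPos_pairwise P 0 s
        rw [hXi, List.pairwise_append] at hpw
        intro x hx
        exact hpw.2.2 x hx i (by simp)
      have hfree2 : ∀ c ∈ s.drop (k + 1), P c = false := by
        intro c hc
        rw [List.mem_iff_getElem] at hc
        obtain ⟨j, hj, rfl⟩ := hc
        rw [List.getElem_drop] at *
        by_contra hP
        have hmem : ((k + 1 + j : Nat) : Int) ∈ pvPos P 0 s := by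
          rw [pvPos_mem]
          refine ⟨k + 1 + j, by have h5 := hj; simp at h5; omega, by omega, ?_⟩
          simpa using hP
        rw [hXi] at hmem
        rcases List.mem_append.mp hmem with hm | hm
        · have := hmax _ hm
          omega
        · simp at hm
          omega
      -- decompose the string at position k
      have hdec : s = s.take k ++ s[k] :: s.drop (k + 1) := by
        conv_lhs => rw [← List.take_append_drop k s]
        rw [List.drop_eq_getElem_cons hk]
      -- decompose the positions list accordingly
      have hpos1 : pvPos P 0 s = pvPos P 0 (s.take k) ++ [(k : Int)] := by
        conv_lhs => rw [hdec]
        rw [pvPos_append, pvPos_cons, pvPos_free P _ _ hfree2, hPk]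
        simp [List.length_take, Nat.min_eq_left (Nat.le_of_lt hk)]
      have hX : X = pvPos P 0 (s.take k) := by
        have h2 : X ++ [i] = pvPos P 0 (s.take k) ++ [(k : Int)] := by
          rw [← hXi, hpos1]
        have := congrArg List.dropLast h2
        simpa [List.dropLast_concat] using this
      -- chosen boundaries: those of take k (with one fewer split) plus k
      have hch : pvChosen b (pvPos P 0 s)
          = pvChosen (b.map Nat.pred) (pvPos P 0 (s.take k)) ++ [(k : Int)] := by
        rw [hpos1, pvChosen_concat b hb]
      rw [hch]
      -- slicing: peel off the last boundary
      have hq : ∀ j ∈ pvChosen (b.map Nat.pred) (pvPos P 0 (s.take k)), 0 ≤ j ∧ j < (k : Int) := by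
        intro j hj
        have := pvChosen_subset _ _ _ hj
        rw [pvPos_mem] at this
        obtain ⟨k', hk', rfl, _⟩ := this
        simp [List.length_take] at hk'
        omega
      rw [show ((k : Int)) = (k : Int) from rfl] at *
      have hsnoc := pvCore_snoc s (k : Int) (by omega)
        (pvChosen (b.map Nat.pred) (pvPos P 0 (s.take k))) (-1) (by omega) hq
      rw [hsnoc]
      have htoNat : ((k : Int)).toNat = k := by omega
      rw [htoNat]
      -- induction hypothesis on the prefix
      have hlen : (s.take k).length < n := by
        simp [List.length_take]
        omega
      rw [ih _ hlen (s.take k) (b.map Nat.pred) rfl]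
      -- reference side: split off the rightmost delimiter
      have hrev : s.reverse = (s.drop (k + 1)).reverse ++ (s[k] :: (s.take k).reverse) := by
        conv_lhs => rw [hdec]
        simp
      rw [hrev, pvRefRev_free P b _ _ (fun c hc => hfree2 c (List.mem_reverse.mp hc))]
      rw [pvRefRev_cons_pos _ _ _ _ (by simp [hPk, hb])]
      simp [pvCombine]

-- B's fold over the chosen boundaries, characterised by pvCore.
lemma pvFoldB (string : String) :
    ∀ (l : List Int) (acc : List String) (prev : Int), -1 ≤ prev → (∀ i ∈ l, 0 ≤ i) →
    (let fin := l.foldl (pvStepB string) (acc, prev)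
     fin.1 ++ [PySem.Str.slice string (some (fin.2 + 1)) none])
    = acc ++ (pvCore string.toList prev l).map String.ofList := by
  intro l
  induction l with
  | nil =>
    intro acc prev hprev _
    simp only [List.foldl_nil, pvCore, List.map]
    rw [show PySem.Str.slice string (some (prev + 1)) none
          = String.ofList (string.toList.drop (prev + 1).toNat) by
      simp only [PySem.Str.slice, PySem.Chars.slice_eq_listSlice]
      rw [PySem.List.slice_from _ (by omega)]]
  | cons i l ih =>
    intro acc prev hprev hpos
    have hi : 0 ≤ i := hpos i (by simp)
    simp only [List.foldl_cons]
    rw [show pvStepB string (acc, prev) i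
          = (acc ++ [PySem.Str.slice string (some (prev + 1)) (some i)], i) from rfl]
    rw [ih _ i (by omega) (fun x hx => hpos x (by simp [hx]))]
    rw [show PySem.Str.slice string (some (prev + 1)) (some i)
          = String.ofList ((string.toList.drop (prev + 1).toNat).take
              (i.toNat - (prev + 1).toNat)) by
      simp only [PySem.Str.slice, PySem.Chars.slice_eq_listSlice]
      rw [PySem.List.slice_toNat _ (by omega) hi]]
    simp [pvCore]

-- B's tail computation after the chosen boundaries are fixed.
def pvTailB (string : String) (ch : List Int) : List String :=
  (ch.foldl (pvStepB string) ([], -1)).1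
    ++ [PySem.Str.slice string (some ((ch.foldl (pvStepB string) ([], -1)).2 + 1)) none]

lemma pvTailB_eq (string : String) (ch : List Int) (h0 : ∀ i ∈ ch, 0 ≤ i) :
    pvTailB string ch = (pvCore string.toList (-1) ch).map String.ofList := by
  have := pvFoldB string ch [] (-1) (by omega) h0
  simpa [pvTailB] using this

theorem pvB_char (string delimiter : String) (m : Int) :
    R_split_alt string delimiter m
      = ((pvRefRev (pvP delimiter) (pvBudget m 0) string.toList.reverse).map String.ofList).reverse := by
  have h1 : R_split_alt string delimiter m
      = pvTailB string
          (if (m == -1) = true then pvPos (pvP delimiter) 0 string.toList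
           else if 0 ≤ m then
             PySem.List.slice (pvPos (pvP delimiter) 0 string.toList)
               (some (max 0 (((pvPos (pvP delimiter) 0 string.toList).length : Int) - m))) none
           else []) := rfl
  have hch : (if (m == -1) = true then pvPos (pvP delimiter) 0 string.toList
           else if 0 ≤ m then
             PySem.List.slice (pvPos (pvP delimiter) 0 string.toList)
               (some (max 0 (((pvPos (pvP delimiter) 0 string.toList).length : Int) - m))) none
           else [])
      = pvChosen (pvBudget m 0) (pvPos (pvP delimiter) 0 string.toList) := by
    set ps := pvPos (pvP delimiter) 0 string.toList with hps
    by_cases hm : m = -1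
    · simp [hm, pvBudget, pvChosen]
    · have hbud : pvChosen (pvBudget m 0) ps = ps.drop (ps.length - (m - 0).toNat) := by
        simp [pvBudget, pvChosen, hm]
      rw [hbud]
      by_cases h0 : 0 ≤ m
      · rw [if_neg (by simp [hm]), if_pos h0,
          PySem.List.slice_from _ (le_max_left 0 ((ps.length : Int) - m))]
        congr 1
        omega
      · rw [if_neg (by simp [hm]), if_neg h0]
        have : (m - 0).toNat = 0 := by omega
        rw [this]
        simp
  rw [h1, hch]
  rw [pvTailB_eq string _ (fun i hi => by
      have h2 := pvChosen_subset _ _ _ hi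
      rw [pvPos_mem] at h2
      obtain ⟨k, hk, rfl, _⟩ := h2
      omega)]
  rw [pvCrux (pvP delimiter) string.toList.length string.toList (pvBudget m 0) rfl]
  rw [List.map_reverse]

-- ===== VERDICT (by name: the statement is the Claim_ definition above) =====
theorem R_split_spec : Claim_equal_R_split := by
  intro string delimiter maxsplit _
  unfold Spec_R_split
  rw [pvA_char, pvB_char]
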